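-- pv_equiv track=rewrite | github.com/DarkPurple141/HackerRank | algos/atlassian/q2.py | checkIPs
-- ===== SOURCE A (Python) =====
-- chars = ['a','b','c','d','e','f']
--
-- upper = ['A','B','D','E','F','C']
--
-- dig = ['1','2','3','4','5','6','7','8','9','0']
--
-- def ipv6(arr):
--     for sub in arr:
--         if not sub:
--             return "Neither"
--         if len(sub) > 4:
--             return "Neither"
--         for c in sub:
--             if c not in dig and c not in chars and c not in upper:
--                 return "Neither"
--
--     return "IPv6"
--
-- def ipv4(arr):
--     for sub in arr:
--         if not sub:
--             return "Neither"
--         if (len(sub) > 3):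
--             return "Neither"
--         for c in sub:
--             if c not in dig:
--                 return "Neither"
--         if int(sub) > 255:
--             return "Neither"
--
--     return "IPv4"
--
-- def checkIPs(ip_array):
--     result = []
--     for ip in ip_array:
--         notI4 = False
--         notI6 = False
--         if '.' not in ip:
--             notI4 = True
--         if ':' not in ip:
--             notI6 = True
--
--         if notI4 and notI6 or not (notI4 or notI6):
--             result.append("Neither")
--         elif notI4:
--             temp = ip.split(":")
--             if len(temp) != 8:
--                 result.append("Neither")
--             else:
--                 result.append(ipv6(temp))
--         elif notI6:
--             temp = ip.split(".")
--             if len(temp) != 4: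
--                 result.append("Neither")
--             else:
--                 result.append(ipv4(temp))
--
--     return result
-- ===== SOURCE B (Python) =====
-- def _scan(ip):
--     # single left-to-right pass: a finite-state machine over the characters,
--     # tracking the separator seen, segment count, and per-segment length /
--     # digit-ness / hex-ness / running decimal value. No splitting.
--     sep = ''
--     nparts = 1
--     seg_len = 0
--     dig_ok = True
--     hex_ok = True
--     val = 0
--     v4_all = True
--     v6_all = True
--     for c in ip:
--         if c == '.' or c == ':':
--             if sep == '':
--                 sep = c
--             elif c != sep:
--                 return "Neither"
--             v4_all = v4_all and 1 <= seg_len <= 3 and dig_ok and val <= 255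
--             v6_all = v6_all and 1 <= seg_len <= 4 and hex_ok
--             nparts += 1
--             seg_len = 0
--             dig_ok = True
--             hex_ok = True
--             val = 0
--         else:
--             seg_len += 1
--             if '0' <= c <= '9':
--                 val = val * 10 + (ord(c) - 48)
--             else:
--                 dig_ok = False
--             if not ('0' <= c <= '9' or 'a' <= c <= 'f' or 'A' <= c <= 'F'):
--                 hex_ok = False
--     v4_all = v4_all and 1 <= seg_len <= 3 and dig_ok and val <= 255
--     v6_all = v6_all and 1 <= seg_len <= 4 and hex_ok
--     if sep == '.':
--         return "IPv4" if nparts == 4 and v4_all else "Neither"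
--     if sep == ':':
--         return "IPv6" if nparts == 8 and v6_all else "Neither"
--     return "Neither"
--
--
-- def checkIPs(ip_array):
--     return [_scan(ip) for ip in ip_array]
-- ===== Notes on version B (the rewrite author's own statement) =====
-- stated objective: alternative
-- what changed: A splits each string on '.'/':' and validates the resulting part lists with per-protocol helper loops; B never splits: it classifies each string in one left-to-right character pass with a finite-state machine tracking the separator seen, the segment count and the current segment's length, digit-ness, hex-ness and running decimal value.
import Mathlib
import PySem

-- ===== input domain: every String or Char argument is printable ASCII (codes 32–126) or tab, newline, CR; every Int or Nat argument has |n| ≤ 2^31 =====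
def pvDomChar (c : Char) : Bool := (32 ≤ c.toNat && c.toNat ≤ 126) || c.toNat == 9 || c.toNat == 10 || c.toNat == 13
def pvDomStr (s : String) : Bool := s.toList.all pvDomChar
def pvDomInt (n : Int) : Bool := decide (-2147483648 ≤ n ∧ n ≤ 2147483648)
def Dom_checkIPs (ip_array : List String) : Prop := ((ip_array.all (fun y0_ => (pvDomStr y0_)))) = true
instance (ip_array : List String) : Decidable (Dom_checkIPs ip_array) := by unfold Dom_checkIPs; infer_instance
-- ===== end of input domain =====

-- B replaces A's split-then-validate (split on '.'/':', helper loops over the parts)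
-- by a single left-to-right character scan: a finite-state machine that never splits,
-- tracking separator, segment count and per-segment length/digitness/hexness/value
-- (objective: alternative; same exact return value).

-- ===== PORT A =====
def pvDig : List Char := ['1','2','3','4','5','6','7','8','9','0']
def pvChars : List Char := ['a','b','c','d','e','f']
def pvUpper : List Char := ['A','B','D','E','F','C']

-- the inner 'for c in sub: if …: return "Neither"' is ported as List.any (first
-- violation short-circuits to "Neither", exactly Python's early return)
def ipv6A : List (List Char) → String
  | [] => "IPv6"
  | sub :: rest =>
    if sub = [] then "Neither"
    else if 4 < sub.length then "Neither"
    else if sub.any (fun c => !(pvDig.contains c) && !(pvChars.contains c) && !(pvUpper.contains c)) then "Neither"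
    else ipv6A rest

def ipv4A : List (List Char) → String
  | [] => "IPv4"
  | sub :: rest =>
    if sub = [] then "Neither"
    else if 3 < sub.length then "Neither"
    else if sub.any (fun c => !(pvDig.contains c)) then "Neither"
    -- int(sub): guarded by the all-digits check above, so ofChars? is some here
    else if 255 < (PySem.Int.ofChars? sub).getD 0 then "Neither"
    else ipv4A rest

def checkIPs (ip_array : List String) : List String :=
  ip_array.foldl (fun result ip =>
    let notI4 := !(PySem.Str.isIn "." ip)
    let notI6 := !(PySem.Str.isIn ":" ip)
    if (notI4 && notI6 || !(notI4 || notI6)) = true then result ++ ["Neither"]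
    else if notI4 = true then
      let temp := PySem.Chars.splitOn ip.toList [':']
      if temp.length ≠ 8 then result ++ ["Neither"] else result ++ [ipv6A temp]
    else if notI6 = true then
      let temp := PySem.Chars.splitOn ip.toList ['.']
      if temp.length ≠ 4 then result ++ ["Neither"] else result ++ [ipv4A temp]
    else result) []

-- ===== PORT B =====
-- Source B's _scan: one pass over the characters; Python's sep='' sentinel is Option Char;
-- the 'return "Neither"' on a mixed separator is the non-recursive branch.
-- closing checks 'v4_all and 1<=seg_len<=3 and dig_ok and val<=255' / v6 analogue:
def segV4 (segLen : Nat) (digOk : Bool) (val : Int) : Bool :=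
  decide (1 ≤ segLen) && decide (segLen ≤ 3) && digOk && decide (val ≤ 255)
def segV6 (segLen : Nat) (hexOk : Bool) : Bool :=
  decide (1 ≤ segLen) && decide (segLen ≤ 4) && hexOk

def scanGo : List Char → Option Char → Nat → Nat → Bool → Bool → Int → Bool → Bool → String
  | [], sep, nparts, segLen, digOk, hexOk, val, v4all, v6all =>
    let v4 := v4all && segV4 segLen digOk val
    let v6 := v6all && segV6 segLen hexOk
    if sep = some '.' then (if nparts = 4 ∧ v4 = true then "IPv4" else "Neither")
    else if sep = some ':' then (if nparts = 8 ∧ v6 = true then "IPv6" else "Neither")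
    else "Neither"
  | c :: rest, sep, nparts, segLen, digOk, hexOk, val, v4all, v6all =>
    if c = '.' ∨ c = ':' then
      match sep with
      | none =>
        scanGo rest (some c) (nparts + 1) 0 true true 0
          (v4all && segV4 segLen digOk val) (v6all && segV6 segLen hexOk)
      | some s =>
        if c = s then
          scanGo rest (some s) (nparts + 1) 0 true true 0
            (v4all && segV4 segLen digOk val) (v6all && segV6 segLen hexOk)
        else "Neither"
    else
      let digOk' := if decide ('0' ≤ c ∧ c ≤ '9') then digOk else false
      let val' := if decide ('0' ≤ c ∧ c ≤ '9') then val * 10 + ((c.toNat : Int) - 48) else val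
      let hexOk' := if decide (('0' ≤ c ∧ c ≤ '9') ∨ ('a' ≤ c ∧ c ≤ 'f') ∨ ('A' ≤ c ∧ c ≤ 'F')) then hexOk else false
      scanGo rest sep nparts (segLen + 1) digOk' hexOk' val' v4all v6all

def checkIPs_alt (ip_array : List String) : List String :=
  ip_array.map (fun ip => scanGo ip.toList none 1 0 true true 0 true true)

-- ===== PRECONDITION & SPEC =====
def Spec_checkIPs (ip_array : List String) (out : List String) : Prop := out = checkIPs_alt ip_array
instance (ip_array : List String) (out : List String) : Decidable (Spec_checkIPs ip_array out) := by unfold Spec_checkIPs; infer_instance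

-- ===== CLAIM (what is proved, stated in full; the proofs are below) =====
def Claim_equal_checkIPs : Prop := ∀ (ip_array : List String), Dom_checkIPs ip_array → Spec_checkIPs ip_array (checkIPs ip_array)

-- ===== LEMMAS AND PROOFS =====

-- structural single-character split, used to reason about PySem.Chars.splitOn
def splitCh (d : Char) : List Char → List (List Char)
  | [] => [[]]
  | c :: rest =>
    if c = d then [] :: splitCh d rest
    else (c :: (splitCh d rest).headI) :: (splitCh d rest).tail

lemma splitCh_ne_nil (d : Char) (l : List Char) : splitCh d l ≠ [] := by
  cases l with
  | nil => simp [splitCh]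
  | cons c rest => simp only [splitCh]; split_ifs <;> simp

lemma splitOn_go_single (d : Char) (l : List Char) : ∀ (fuel : Nat) (cur : List Char)
    (acc : List (List Char)), l.length ≤ fuel →
    PySem.Chars.splitOn.go [d] fuel l cur acc
      = acc.reverse ++ (cur.reverse ++ (splitCh d l).headI) :: (splitCh d l).tail := by
  induction l with
  | nil =>
    intro fuel cur acc _
    cases fuel <;> simp [PySem.Chars.splitOn.go, splitCh]
  | cons c rest ih =>
    intro fuel cur acc hf
    cases fuel with
    | zero => simp at hf
    | succ f =>
      rw [PySem.Chars.splitOn.go]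
      by_cases hcd : c = d
      · subst hcd
        have hpre : List.isPrefixOf [c] (c :: rest) = true := by simp [List.isPrefixOf]
        simp only [hpre, if_true, List.length_cons] at *
        simp only [List.length_nil, Nat.zero_add, List.drop_succ_cons, List.drop_zero]
        rw [ih f [] (cur.reverse :: acc) (by omega)]
        rcases hsp : splitCh c rest with _ | ⟨h, t⟩
        · exact absurd hsp (splitCh_ne_nil c rest)
        · simp [splitCh, hsp]
      · have hpre : List.isPrefixOf [d] (c :: rest) = false := by
          have hdc : d ≠ c := fun h => hcd h.symm
          simp [List.isPrefixOf, hdc]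
        simp only [hpre, Bool.false_eq_true, if_false]
        rw [ih f (c :: cur) acc (by simpa using Nat.le_of_succ_le_succ hf)]
        rcases hsp : splitCh d rest with _ | ⟨h, t⟩
        · exact absurd hsp (splitCh_ne_nil d rest)
        · simp [splitCh, hcd, hsp]

lemma splitOn_single (s : List Char) (d : Char) :
    PySem.Chars.splitOn s [d] = splitCh d s := by
  rw [PySem.Chars.splitOn, splitOn_go_single d s (s.length + 1) [] [] (by omega)]
  rcases hsp : splitCh d s with _ | ⟨h, t⟩
  · exact absurd hsp (splitCh_ne_nil d s)
  · simp

lemma isIn_single_iff_mem (d : Char) (s : List Char) :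
    PySem.Chars.isIn [d] s = true ↔ d ∈ s := by
  rw [PySem.Chars.isIn_iff_infix]
  constructor
  · intro h; exact h.subset (List.mem_singleton_self d)
  · intro h
    obtain ⟨l1, l2, rfl⟩ := List.append_of_mem h
    exact ⟨l1, l2, by simp⟩

-- ----- per-character facts: list membership in A's tables = B's range tests -----

lemma char_eq_iff_toNat (c d : Char) : c = d ↔ c.toNat = d.toNat := by
  constructor
  · intro h; rw [h]
  · intro h
    exact Char.ext (by exact UInt32.toNat_inj.mp h)

lemma le_char_iff (c d : Char) : c ≤ d ↔ c.toNat ≤ d.toNat := by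
  rw [Char.le_def]; exact UInt32.le_iff_toNat_le

lemma toNat_ofNat_lt (n : Nat) (h : n < 55296) : (Char.ofNat n).toNat = n := by
  have hv : n.isValidChar := Or.inl h
  simp [Char.ofNat, hv, Char.ofNatAux, Char.toNat]

-- numeric values of the character literals involved (all rfl)
lemma chv : ('0':Char).toNat = 48 ∧ ('1':Char).toNat = 49 ∧ ('2':Char).toNat = 50
    ∧ ('3':Char).toNat = 51 ∧ ('4':Char).toNat = 52 ∧ ('5':Char).toNat = 53
    ∧ ('6':Char).toNat = 54 ∧ ('7':Char).toNat = 55 ∧ ('8':Char).toNat = 56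
    ∧ ('9':Char).toNat = 57 ∧ ('a':Char).toNat = 97 ∧ ('b':Char).toNat = 98
    ∧ ('c':Char).toNat = 99 ∧ ('d':Char).toNat = 100 ∧ ('e':Char).toNat = 101
    ∧ ('f':Char).toNat = 102 ∧ ('A':Char).toNat = 65 ∧ ('B':Char).toNat = 66
    ∧ ('C':Char).toNat = 67 ∧ ('D':Char).toNat = 68 ∧ ('E':Char).toNat = 69
    ∧ ('F':Char).toNat = 70 := by decide

lemma contains_dig (c : Char) :
    pvDig.contains c = decide ('0' ≤ c ∧ c ≤ '9') := by
  rw [Bool.eq_iff_iff]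
  simp only [pvDig, List.contains_eq_mem, decide_eq_true_eq, List.mem_cons,
    List.not_mem_nil, or_false, char_eq_iff_toNat, le_char_iff, chv.1, chv.2.1,
    chv.2.2.1, chv.2.2.2.1, chv.2.2.2.2.1, chv.2.2.2.2.2.1, chv.2.2.2.2.2.2.1,
    chv.2.2.2.2.2.2.2.1, chv.2.2.2.2.2.2.2.2.1, chv.2.2.2.2.2.2.2.2.2.1]
  omega

lemma contains_hex (c : Char) :
    (pvDig.contains c || pvChars.contains c || pvUpper.contains c)
      = decide (('0' ≤ c ∧ c ≤ '9') ∨ ('a' ≤ c ∧ c ≤ 'f') ∨ ('A' ≤ c ∧ c ≤ 'F')) := by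
  rw [Bool.eq_iff_iff]
  simp only [pvDig, pvChars, pvUpper, Bool.or_eq_true, List.contains_eq_mem,
    decide_eq_true_eq, List.mem_cons, List.not_mem_nil, or_false,
    char_eq_iff_toNat, le_char_iff, chv.1, chv.2.1, chv.2.2.1, chv.2.2.2.1,
    chv.2.2.2.2.1, chv.2.2.2.2.2.1, chv.2.2.2.2.2.2.1, chv.2.2.2.2.2.2.2.1,
    chv.2.2.2.2.2.2.2.2.1, chv.2.2.2.2.2.2.2.2.2.1, chv.2.2.2.2.2.2.2.2.2.2.1,
    chv.2.2.2.2.2.2.2.2.2.2.2.1, chv.2.2.2.2.2.2.2.2.2.2.2.2.1,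
    chv.2.2.2.2.2.2.2.2.2.2.2.2.2.1, chv.2.2.2.2.2.2.2.2.2.2.2.2.2.2.1,
    chv.2.2.2.2.2.2.2.2.2.2.2.2.2.2.2.1, chv.2.2.2.2.2.2.2.2.2.2.2.2.2.2.2.2.1,
    chv.2.2.2.2.2.2.2.2.2.2.2.2.2.2.2.2.2.1,
    chv.2.2.2.2.2.2.2.2.2.2.2.2.2.2.2.2.2.2.1,
    chv.2.2.2.2.2.2.2.2.2.2.2.2.2.2.2.2.2.2.2.1,
    chv.2.2.2.2.2.2.2.2.2.2.2.2.2.2.2.2.2.2.2.2.1,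
    chv.2.2.2.2.2.2.2.2.2.2.2.2.2.2.2.2.2.2.2.2.2]
  omega

-- ----- value of int() on a short all-digit string -----

def pvDigB (c : Char) : Bool := decide ('0' ≤ c ∧ c ≤ '9')

def dCh (i : Fin 10) : Char := Char.ofNat (48 + i.val)

def valAux (v : Int) (p : List Char) : Int :=
  p.foldl (fun a c => if pvDigB c then a * 10 + ((c.toNat : Int) - 48) else a) v

lemma ofChars_one : ∀ i : Fin 10,
    PySem.Int.ofChars? [dCh i] = some (i.val : Int) := by decide

lemma ofChars_two : ∀ i j : Fin 10,
    PySem.Int.ofChars? [dCh i, dCh j] = some ((10 * i.val + j.val : Nat) : Int) := by decide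

lemma ofChars_three : ∀ i j k : Fin 10,
    PySem.Int.ofChars? [dCh i, dCh j, dCh k]
      = some ((100 * i.val + 10 * j.val + k.val : Nat) : Int) := by decide

lemma digB_repr (c : Char) (h : pvDigB c = true) :
    ∃ i : Fin 10, c = dCh i := by
  simp only [pvDigB, decide_eq_true_eq, le_char_iff, chv.1,
    chv.2.2.2.2.2.2.2.2.2.1] at h
  refine ⟨⟨c.toNat - 48, by omega⟩, ?_⟩
  rw [char_eq_iff_toNat]
  simp only [dCh]
  rw [toNat_ofNat_lt _ (by omega)]
  omega

lemma toNat_dCh (i : Fin 10) : (dCh i).toNat = 48 + i.val := by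
  simp only [dCh]
  exact toNat_ofNat_lt _ (by omega)

lemma pvDigB_dCh (i : Fin 10) : pvDigB (dCh i) = true := by
  simp only [pvDigB, decide_eq_true_eq, le_char_iff, toNat_dCh, chv.1,
    chv.2.2.2.2.2.2.2.2.2.1]
  omega

lemma ofChars_eq_valAux (p : List Char) (hne : p ≠ []) (hlen : p.length ≤ 3)
    (hdig : p.all pvDigB = true) :
    (PySem.Int.ofChars? p).getD 0 = valAux 0 p := by
  match p, hne, hlen with
  | [a], _, _ =>
    simp only [List.all_cons, List.all_nil, Bool.and_true] at hdig
    obtain ⟨i, rfl⟩ := digB_repr a hdig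
    rw [ofChars_one]
    simp [valAux, pvDigB_dCh, toNat_dCh]
  | [a, b], _, _ =>
    simp only [List.all_cons, List.all_nil, Bool.and_true, Bool.and_eq_true] at hdig
    obtain ⟨i, rfl⟩ := digB_repr a hdig.1
    obtain ⟨j, rfl⟩ := digB_repr b hdig.2
    rw [ofChars_two]
    simp [valAux, pvDigB_dCh, toNat_dCh]
    ring
  | [a, b, c], _, _ =>
    simp only [List.all_cons, List.all_nil, Bool.and_true, Bool.and_eq_true] at hdig
    obtain ⟨i, rfl⟩ := digB_repr a hdig.1
    obtain ⟨j, rfl⟩ := digB_repr b hdig.2.1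
    obtain ⟨k, rfl⟩ := digB_repr c hdig.2.2
    rw [ofChars_three]
    simp [valAux, pvDigB_dCh, toNat_dCh]
    ring

-- ----- the FSM's per-segment state as a fold -----

def segUpd (st : Nat × Bool × Bool × Int) (c : Char) : Nat × Bool × Bool × Int :=
  (st.1 + 1,
   if decide ('0' ≤ c ∧ c ≤ '9') then st.2.1 else false,
   if decide (('0' ≤ c ∧ c ≤ '9') ∨ ('a' ≤ c ∧ c ≤ 'f') ∨ ('A' ≤ c ∧ c ≤ 'F')) then st.2.2.1 else false,
   if decide ('0' ≤ c ∧ c ≤ '9') then st.2.2.2 * 10 + ((c.toNat : Int) - 48) else st.2.2.2)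

def segInit : Nat × Bool × Bool × Int := (0, true, true, 0)

def pvHexB (c : Char) : Bool :=
  decide (('0' ≤ c ∧ c ≤ '9') ∨ ('a' ≤ c ∧ c ≤ 'f') ∨ ('A' ≤ c ∧ c ≤ 'F'))

lemma segUpd_foldl (p : List Char) : ∀ (L : Nat) (dk hk : Bool) (v : Int),
    p.foldl segUpd (L, dk, hk, v)
      = (L + p.length, dk && p.all pvDigB, hk && p.all pvHexB, valAux v p) := by
  induction p with
  | nil => intro L dk hk v; simp [valAux]
  | cons c rest ih =>
    intro L dk hk v
    have hstep : segUpd (L, dk, hk, v) c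
        = (L + 1, dk && pvDigB c, hk && pvHexB c,
           if pvDigB c then v * 10 + ((c.toNat : Int) - 48) else v) := by
      by_cases h1 : ('0' ≤ c ∧ c ≤ '9') <;>
        by_cases h2 : (('0' ≤ c ∧ c ≤ '9') ∨ ('a' ≤ c ∧ c ≤ 'f') ∨ ('A' ≤ c ∧ c ≤ 'F')) <;>
          simp [segUpd, pvDigB, pvHexB, h1, Bool.and_comm]
    rw [List.foldl_cons, hstep, ih]
    simp only [Prod.mk.injEq, List.all_cons, List.length_cons, valAux, List.foldl_cons]
    exact ⟨by omega, by rw [Bool.and_assoc], by rw [Bool.and_assoc], trivial⟩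

-- the closing checks applied to a fold state
def v4okS (st : Nat × Bool × Bool × Int) : Bool := segV4 st.1 st.2.1 st.2.2.2
def v6okS (st : Nat × Bool × Bool × Int) : Bool := segV6 st.1 st.2.2.1

-- spec of the FSM once the separator is known: segment list = splitCh of the rest,
-- with the first part continuing the current segment state
def specD (rest : List Char) (n : Nat) (st : Nat × Bool × Bool × Int) (v4 : Bool) : String :=
  if n + (splitCh '.' rest).length - 1 = 4 ∧ v4 = true
      ∧ v4okS ((splitCh '.' rest).headI.foldl segUpd st) = true
      ∧ ∀ p ∈ (splitCh '.' rest).tail, v4okS (p.foldl segUpd segInit) = true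
  then "IPv4" else "Neither"

def specC (rest : List Char) (n : Nat) (st : Nat × Bool × Bool × Int) (v6 : Bool) : String :=
  if n + (splitCh ':' rest).length - 1 = 8 ∧ v6 = true
      ∧ v6okS ((splitCh ':' rest).headI.foldl segUpd st) = true
      ∧ ∀ p ∈ (splitCh ':' rest).tail, v6okS (p.foldl segUpd segInit) = true
  then "IPv6" else "Neither"

lemma mem_cons_ne (a c : Char) (rest : List Char) (h : a ≠ c) :
    a ∈ c :: rest ↔ a ∈ rest := by
  simp [List.mem_cons, h]

lemma specD_sep (rest : List Char) (n : Nat) (st : Nat × Bool × Bool × Int) (v4 : Bool) :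
    specD ('.' :: rest) n st v4 = specD rest (n + 1) segInit (v4 && v4okS st) := by
  simp only [specD, splitCh, if_true]
  rcases hsp : splitCh '.' rest with _ | ⟨h, t⟩
  · exact absurd hsp (splitCh_ne_nil '.' rest)
  refine if_congr ?_ rfl rfl
  simp only [hsp, List.headI, List.tail, List.length_cons, List.foldl_nil,
    List.mem_cons, Bool.and_eq_true, forall_eq_or_imp]
  constructor
  · rintro ⟨hn, hv4, hst, hh, ht⟩
    exact ⟨by omega, ⟨hv4, hst⟩, hh, ht⟩
  · rintro ⟨hn, ⟨hv4, hst⟩, hh, ht⟩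
    exact ⟨by omega, hv4, hst, hh, ht⟩

lemma specC_sep (rest : List Char) (n : Nat) (st : Nat × Bool × Bool × Int) (v6 : Bool) :
    specC (':' :: rest) n st v6 = specC rest (n + 1) segInit (v6 && v6okS st) := by
  simp only [specC, splitCh, if_true]
  rcases hsp : splitCh ':' rest with _ | ⟨h, t⟩
  · exact absurd hsp (splitCh_ne_nil ':' rest)
  refine if_congr ?_ rfl rfl
  simp only [hsp, List.headI, List.tail, List.length_cons, List.foldl_nil,
    List.mem_cons, Bool.and_eq_true, forall_eq_or_imp]
  constructor
  · rintro ⟨hn, hv6, hst, hh, ht⟩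
    exact ⟨by omega, ⟨hv6, hst⟩, hh, ht⟩
  · rintro ⟨hn, ⟨hv6, hst⟩, hh, ht⟩
    exact ⟨by omega, hv6, hst, hh, ht⟩

lemma specD_char (rest : List Char) (c : Char) (hc : c ≠ '.') (n : Nat)
    (st : Nat × Bool × Bool × Int) (v4 : Bool) :
    specD (c :: rest) n st v4 = specD rest n (segUpd st c) v4 := by
  simp only [specD, splitCh, hc, if_false]
  rcases hsp : splitCh '.' rest with _ | ⟨h, t⟩
  · exact absurd hsp (splitCh_ne_nil '.' rest)
  simp only [hsp, List.headI, List.tail, List.length_cons, List.foldl_cons]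
  rfl

lemma specC_char (rest : List Char) (c : Char) (hc : c ≠ ':') (n : Nat)
    (st : Nat × Bool × Bool × Int) (v6 : Bool) :
    specC (c :: rest) n st v6 = specC rest n (segUpd st c) v6 := by
  simp only [specC, splitCh, hc, if_false]
  rcases hsp : splitCh ':' rest with _ | ⟨h, t⟩
  · exact absurd hsp (splitCh_ne_nil ':' rest)
  simp only [hsp, List.headI, List.tail, List.length_cons, List.foldl_cons]
  rfl

-- port's inline lets = segUpd (definitional)
lemma segUpd_def (L : Nat) (dk hk : Bool) (v : Int) (c : Char) :
    segUpd (L, dk, hk, v) c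
      = (L + 1, if decide ('0' ≤ c ∧ c ≤ '9') then dk else false,
         if decide (('0' ≤ c ∧ c ≤ '9') ∨ ('a' ≤ c ∧ c ≤ 'f') ∨ ('A' ≤ c ∧ c ≤ 'F')) then hk else false,
         if decide ('0' ≤ c ∧ c ≤ '9') then v * 10 + ((c.toNat : Int) - 48) else v) := rfl

lemma specD_nil (n : Nat) (st : Nat × Bool × Bool × Int) (v4 : Bool) :
    specD [] n st v4
      = if n = 4 ∧ (v4 && v4okS st) = true then "IPv4" else "Neither" := by
  simp only [specD, splitCh, List.length_cons, List.length_nil, List.headI,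
    List.tail, List.foldl_nil, List.not_mem_nil, Bool.and_eq_true]
  refine if_congr ?_ rfl rfl
  constructor
  · rintro ⟨hn, hv4, hst, _⟩; exact ⟨by omega, hv4, hst⟩
  · rintro ⟨hn, hv4, hst⟩; exact ⟨by omega, hv4, hst, by simp⟩

lemma specC_nil (n : Nat) (st : Nat × Bool × Bool × Int) (v6 : Bool) :
    specC [] n st v6
      = if n = 8 ∧ (v6 && v6okS st) = true then "IPv6" else "Neither" := by
  simp only [specC, splitCh, List.length_cons, List.length_nil, List.headI,
    List.tail, List.foldl_nil, List.not_mem_nil, Bool.and_eq_true]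
  refine if_congr ?_ rfl rfl
  constructor
  · rintro ⟨hn, hv6, hst, _⟩; exact ⟨by omega, hv6, hst⟩
  · rintro ⟨hn, hv6, hst⟩; exact ⟨by omega, hv6, hst, by simp⟩

lemma scanGo_dot (rest : List Char) : ∀ (n L : Nat) (dk hk : Bool) (v : Int) (v4 v6 : Bool),
    scanGo rest (some '.') n L dk hk v v4 v6
      = if ':' ∈ rest then "Neither" else specD rest n (L, dk, hk, v) v4 := by
  induction rest with
  | nil =>
    intro n L dk hk v v4 v6
    rw [if_neg (show ¬ (':' ∈ ([] : List Char)) by simp), specD_nil]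
    show (if (some '.' : Option Char) = some '.' then
        if n = 4 ∧ (v4 && segV4 L dk v) = true then "IPv4" else "Neither"
      else if (some '.' : Option Char) = some ':' then
        if n = 8 ∧ (v6 && segV6 L hk) = true then "IPv6" else "Neither"
      else "Neither")
      = if n = 4 ∧ (v4 && v4okS (L, dk, hk, v)) = true then "IPv4" else "Neither"
    rw [if_pos rfl]
    rfl
  | cons c rest ih =>
    intro n L dk hk v v4 v6
    by_cases hc : c = ':'
    · subst hc
      rw [show scanGo (':' :: rest) (some '.') n L dk hk v v4 v6 = "Neither" from by
        simp [scanGo]]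
      rw [if_pos (List.mem_cons_self)]
    by_cases hd : c = '.'
    · subst hd
      rw [show scanGo ('.' :: rest) (some '.') n L dk hk v v4 v6
          = scanGo rest (some '.') (n + 1) 0 true true 0
              (v4 && segV4 L dk v) (v6 && segV6 L hk) from by simp [scanGo]]
      rw [ih, specD_sep]
      by_cases hcm : ':' ∈ rest
      · rw [if_pos hcm, if_pos ((mem_cons_ne ':' '.' rest (by decide)).mpr hcm)]
      · rw [if_neg hcm, if_neg (fun h => hcm ((mem_cons_ne ':' '.' rest (by decide)).mp h))]
        rfl
    · rw [show scanGo (c :: rest) (some '.') n L dk hk v v4 v6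
          = scanGo rest (some '.') n (L + 1)
              (if decide ('0' ≤ c ∧ c ≤ '9') then dk else false)
              (if decide (('0' ≤ c ∧ c ≤ '9') ∨ ('a' ≤ c ∧ c ≤ 'f') ∨ ('A' ≤ c ∧ c ≤ 'F')) then hk else false)
              (if decide ('0' ≤ c ∧ c ≤ '9') then v * 10 + ((c.toNat : Int) - 48) else v)
              v4 v6 from by simp [scanGo, hc, hd]]
      rw [ih, specD_char rest c hd, segUpd_def]
      by_cases hcm : ':' ∈ rest
      · rw [if_pos hcm, if_pos ((mem_cons_ne ':' c rest (fun h => hc h.symm)).mpr hcm)]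
      · rw [if_neg hcm, if_neg (fun h => hcm ((mem_cons_ne ':' c rest (fun h => hc h.symm)).mp h))]

lemma scanGo_colon (rest : List Char) : ∀ (n L : Nat) (dk hk : Bool) (v : Int) (v4 v6 : Bool),
    scanGo rest (some ':') n L dk hk v v4 v6
      = if '.' ∈ rest then "Neither" else specC rest n (L, dk, hk, v) v6 := by
  induction rest with
  | nil =>
    intro n L dk hk v v4 v6
    rw [if_neg (show ¬ ('.' ∈ ([] : List Char)) by simp), specC_nil]
    show (if (some ':' : Option Char) = some '.' then
        if n = 4 ∧ (v4 && segV4 L dk v) = true then "IPv4" else "Neither"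
      else if (some ':' : Option Char) = some ':' then
        if n = 8 ∧ (v6 && segV6 L hk) = true then "IPv6" else "Neither"
      else "Neither")
      = if n = 8 ∧ (v6 && v6okS (L, dk, hk, v)) = true then "IPv6" else "Neither"
    rw [if_neg (by decide), if_pos rfl]
    rfl
  | cons c rest ih =>
    intro n L dk hk v v4 v6
    by_cases hd : c = '.'
    · subst hd
      rw [show scanGo ('.' :: rest) (some ':') n L dk hk v v4 v6 = "Neither" from by
        simp [scanGo]]
      rw [if_pos (List.mem_cons_self)]
    by_cases hc : c = ':'
    · subst hc
      rw [show scanGo (':' :: rest) (some ':') n L dk hk v v4 v6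
          = scanGo rest (some ':') (n + 1) 0 true true 0
              (v4 && segV4 L dk v) (v6 && segV6 L hk) from by simp [scanGo]]
      rw [ih, specC_sep]
      by_cases hdm : '.' ∈ rest
      · rw [if_pos hdm, if_pos ((mem_cons_ne '.' ':' rest (by decide)).mpr hdm)]
      · rw [if_neg hdm, if_neg (fun h => hdm ((mem_cons_ne '.' ':' rest (by decide)).mp h))]
        rfl
    · rw [show scanGo (c :: rest) (some ':') n L dk hk v v4 v6
          = scanGo rest (some ':') n (L + 1)
              (if decide ('0' ≤ c ∧ c ≤ '9') then dk else false)
              (if decide (('0' ≤ c ∧ c ≤ '9') ∨ ('a' ≤ c ∧ c ≤ 'f') ∨ ('A' ≤ c ∧ c ≤ 'F')) then hk else false)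
              (if decide ('0' ≤ c ∧ c ≤ '9') then v * 10 + ((c.toNat : Int) - 48) else v)
              v4 v6 from by simp [scanGo, hc, hd]]
      rw [ih, specC_char rest c hc, segUpd_def]
      by_cases hdm : '.' ∈ rest
      · rw [if_pos hdm, if_pos ((mem_cons_ne '.' c rest (fun h => hd h.symm)).mpr hdm)]
      · rw [if_neg hdm, if_neg (fun h => hdm ((mem_cons_ne '.' c rest (fun h => hd h.symm)).mp h))]

lemma scanGo_none (rest : List Char) : ∀ (n L : Nat) (dk hk : Bool) (v : Int) (v4 v6 : Bool),
    scanGo rest none n L dk hk v v4 v6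
      = if '.' ∈ rest ∧ ':' ∈ rest then "Neither"
        else if '.' ∈ rest then specD rest n (L, dk, hk, v) v4
        else if ':' ∈ rest then specC rest n (L, dk, hk, v) v6
        else "Neither" := by
  induction rest with
  | nil =>
    intro n L dk hk v v4 v6
    simp [scanGo]
  | cons c rest ih =>
    intro n L dk hk v v4 v6
    by_cases hd : c = '.'
    · subst hd
      rw [show scanGo ('.' :: rest) none n L dk hk v v4 v6
          = scanGo rest (some '.') (n + 1) 0 true true 0
              (v4 && segV4 L dk v) (v6 && segV6 L hk) from by simp [scanGo]]
      rw [scanGo_dot, specD_sep]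
      by_cases hcm : ':' ∈ rest
      · rw [if_pos hcm,
          if_pos ⟨List.mem_cons_self, (mem_cons_ne ':' '.' rest (by decide)).mpr hcm⟩]
      · rw [if_neg hcm,
          if_neg (fun h : ('.' ∈ '.' :: rest ∧ ':' ∈ '.' :: rest) =>
            hcm ((mem_cons_ne ':' '.' rest (by decide)).mp h.2)),
          if_pos (List.mem_cons_self)]
        rfl
    by_cases hc : c = ':'
    · subst hc
      rw [show scanGo (':' :: rest) none n L dk hk v v4 v6
          = scanGo rest (some ':') (n + 1) 0 true true 0
              (v4 && segV4 L dk v) (v6 && segV6 L hk) from by simp [scanGo]]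
      rw [scanGo_colon, specC_sep]
      by_cases hdm : '.' ∈ rest
      · rw [if_pos hdm,
          if_pos ⟨(mem_cons_ne '.' ':' rest (by decide)).mpr hdm, List.mem_cons_self⟩]
      · rw [if_neg hdm,
          if_neg (fun h : ('.' ∈ ':' :: rest ∧ ':' ∈ ':' :: rest) =>
            hdm ((mem_cons_ne '.' ':' rest (by decide)).mp h.1)),
          if_neg (fun h : ('.' ∈ ':' :: rest) =>
            hdm ((mem_cons_ne '.' ':' rest (by decide)).mp h)),
          if_pos (List.mem_cons_self)]
        rfl
    · rw [show scanGo (c :: rest) none n L dk hk v v4 v6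
          = scanGo rest none n (L + 1)
              (if decide ('0' ≤ c ∧ c ≤ '9') then dk else false)
              (if decide (('0' ≤ c ∧ c ≤ '9') ∨ ('a' ≤ c ∧ c ≤ 'f') ∨ ('A' ≤ c ∧ c ≤ 'F')) then hk else false)
              (if decide ('0' ≤ c ∧ c ≤ '9') then v * 10 + ((c.toNat : Int) - 48) else v)
              v4 v6 from by simp [scanGo, hc, hd]]
      rw [ih, specD_char rest c hd, specC_char rest c hc, segUpd_def]
      have hmd := mem_cons_ne '.' c rest (fun h => hd h.symm)
      have hmc := mem_cons_ne ':' c rest (fun h => hc h.symm)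
      by_cases hdm : '.' ∈ rest <;> by_cases hcm : ':' ∈ rest
      · rw [if_pos ⟨hdm, hcm⟩, if_pos ⟨hmd.mpr hdm, hmc.mpr hcm⟩]
      · rw [if_neg (fun h : ('.' ∈ rest ∧ ':' ∈ rest) => hcm h.2),
          if_neg (fun h : ('.' ∈ c :: rest ∧ ':' ∈ c :: rest) => hcm (hmc.mp h.2)),
          if_pos hdm, if_pos (hmd.mpr hdm)]
      · rw [if_neg (fun h : ('.' ∈ rest ∧ ':' ∈ rest) => hdm h.1),
          if_neg (fun h : ('.' ∈ c :: rest ∧ ':' ∈ c :: rest) => hdm (hmd.mp h.1)),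
          if_neg hdm, if_neg (fun h : ('.' ∈ c :: rest) => hdm (hmd.mp h)),
          if_pos hcm, if_pos (hmc.mpr hcm)]
      · rw [if_neg (fun h : ('.' ∈ rest ∧ ':' ∈ rest) => hdm h.1),
          if_neg (fun h : ('.' ∈ c :: rest ∧ ':' ∈ c :: rest) => hdm (hmd.mp h.1)),
          if_neg hdm, if_neg (fun h : ('.' ∈ c :: rest) => hdm (hmd.mp h)),
          if_neg hcm, if_neg (fun h : (':' ∈ c :: rest) => hcm (hmc.mp h))]

-- ----- A's per-string value -----

def isV4Part (s : List Char) : Bool :=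
  !(s = []) && decide (s.length ≤ 3) && s.all (fun c => pvDig.contains c)
    && decide ((PySem.Int.ofChars? s).getD 0 ≤ 255)

def isV6Part (s : List Char) : Bool :=
  decide (1 ≤ s.length) && decide (s.length ≤ 4)
    && s.all (fun c => pvDig.contains c || pvChars.contains c || pvUpper.contains c)

lemma all_digits_eq (s : List Char) :
    s.all (fun c => pvDig.contains c) = !s.any (fun c => !(pvDig.contains c)) := by
  rw [Bool.eq_iff_iff]
  simp only [List.all_eq_true, Bool.not_eq_true', List.any_eq_false, Bool.not_eq_false]

lemma all_hex_eq (s : List Char) :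
    s.all (fun c => pvDig.contains c || pvChars.contains c || pvUpper.contains c)
      = !s.any (fun c => !(pvDig.contains c) && !(pvChars.contains c) && !(pvUpper.contains c)) := by
  rw [Bool.eq_iff_iff]
  simp only [List.all_eq_true, Bool.not_eq_true', List.any_eq_false]
  refine forall_congr' fun c => imp_congr_right fun _ => ?_
  simp
  tauto

lemma ipv4A_eq (l : List (List Char)) :
    ipv4A l = if l.all isV4Part then "IPv4" else "Neither" := by
  induction l with
  | nil => simp [ipv4A]
  | cons sub rest ih =>
    simp only [ipv4A, List.all_cons]
    by_cases h1 : sub = []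
    · have hv : isV4Part sub = false := by
        simp only [isV4Part, h1]
        simp
      rw [if_pos h1]
      simp only [hv, Bool.false_and, Bool.false_eq_true, if_false]
    by_cases h2 : 3 < sub.length
    · have hv : isV4Part sub = false := by
        simp only [isV4Part]
        rw [decide_eq_false (show ¬ sub.length ≤ 3 by omega)]
        simp
      rw [if_neg h1, if_pos h2]
      simp only [hv, Bool.false_and, Bool.false_eq_true, if_false]
    by_cases h3 : sub.any (fun c => !(pvDig.contains c)) = true
    · have hv : isV4Part sub = false := by
        have hall := all_digits_eq sub
        rw [h3] at hall
        simp only [Bool.not_true] at hall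
        simp only [isV4Part, hall, Bool.and_false, Bool.false_and]
      rw [if_neg h1, if_neg h2, if_pos h3]
      simp only [hv, Bool.false_and, Bool.false_eq_true, if_false]
    by_cases h4 : 255 < (PySem.Int.ofChars? sub).getD 0
    · have hv : isV4Part sub = false := by
        simp only [isV4Part]
        rw [decide_eq_false (show ¬ (PySem.Int.ofChars? sub).getD 0 ≤ 255 by omega)]
        simp
      rw [if_neg h1, if_neg h2, if_neg h3, if_pos h4]
      simp only [hv, Bool.false_and, Bool.false_eq_true, if_false]
    · have hv : isV4Part sub = true := by
        have hall := all_digits_eq sub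
        rw [Bool.eq_false_iff.2 h3] at hall
        simp only [Bool.not_false] at hall
        simp only [isV4Part, hall, Bool.and_true]
        rw [decide_eq_true (show sub.length ≤ 3 by omega),
          decide_eq_true (show (PySem.Int.ofChars? sub).getD 0 ≤ 255 by omega)]
        simp [h1]
      rw [if_neg h1, if_neg h2, if_neg h3, if_neg h4, ih]
      simp only [hv, Bool.true_and]

lemma ipv6A_eq (l : List (List Char)) :
    ipv6A l = if l.all isV6Part then "IPv6" else "Neither" := by
  induction l with
  | nil => simp [ipv6A]
  | cons sub rest ih =>
    simp only [ipv6A, List.all_cons]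
    by_cases h1 : sub = []
    · have hv : isV6Part sub = false := by
        simp only [isV6Part, h1]
        simp
      rw [if_pos h1]
      simp only [hv, Bool.false_and, Bool.false_eq_true, if_false]
    by_cases h2 : 4 < sub.length
    · have hv : isV6Part sub = false := by
        simp only [isV6Part]
        rw [decide_eq_false (show ¬ sub.length ≤ 4 by omega)]
        simp
      rw [if_neg h1, if_pos h2]
      simp only [hv, Bool.false_and, Bool.false_eq_true, if_false]
    by_cases h3 : sub.any (fun c => !(pvDig.contains c) && !(pvChars.contains c) && !(pvUpper.contains c)) = true
    · have hv : isV6Part sub = false := by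
        have hall := all_hex_eq sub
        rw [h3] at hall
        simp only [Bool.not_true] at hall
        simp only [isV6Part, hall, Bool.and_false]
      rw [if_neg h1, if_neg h2, if_pos h3]
      simp only [hv, Bool.false_and, Bool.false_eq_true, if_false]
    · have hlen : 1 ≤ sub.length := by
        cases sub with
        | nil => exact absurd rfl h1
        | cons _ _ => simp
      have hv : isV6Part sub = true := by
        have hall := all_hex_eq sub
        rw [Bool.eq_false_iff.2 h3] at hall
        simp only [Bool.not_false] at hall
        simp only [isV6Part, hall, Bool.and_true]
        rw [decide_eq_true hlen, decide_eq_true (show sub.length ≤ 4 by omega)]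
        simp
      rw [if_neg h1, if_neg h2, if_neg h3, ih]
      simp only [hv, Bool.true_and]

lemma not_decide_nil (p : List Char) : (!decide (p = [])) = decide (1 ≤ p.length) := by
  cases p <;> simp

lemma isV4Part_eq_v4okS (p : List Char) :
    isV4Part p = v4okS (p.foldl segUpd segInit) := by
  have hfold : p.foldl segUpd segInit
      = (0 + p.length, true && p.all pvDigB, true && p.all pvHexB, valAux 0 p) :=
    segUpd_foldl p 0 true true 0
  rw [hfold]
  simp only [isV4Part, v4okS, segV4, Nat.zero_add, Bool.true_and, not_decide_nil]
  have hdig : (p.all fun c => pvDig.contains c) = p.all pvDigB := by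
    simp only [contains_dig]
    rfl
  rw [hdig]
  by_cases hne : p = []
  · subst hne; simp
  by_cases hlen : p.length ≤ 3
  · by_cases hdg : p.all pvDigB = true
    · rw [ofChars_eq_valAux p hne hlen hdg]
    · simp [hdg]
  · simp [hlen]

lemma isV6Part_eq_v6okS (p : List Char) :
    isV6Part p = v6okS (p.foldl segUpd segInit) := by
  have hfold : p.foldl segUpd segInit
      = (0 + p.length, true && p.all pvDigB, true && p.all pvHexB, valAux 0 p) :=
    segUpd_foldl p 0 true true 0
  rw [hfold]
  simp only [isV6Part, v6okS, segV6, Nat.zero_add, Bool.true_and]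
  have hhex : (p.all fun c => pvDig.contains c || pvChars.contains c || pvUpper.contains c)
      = p.all pvHexB := by
    simp only [contains_hex]
    rfl
  rw [hhex]

lemma specD_top (l : List Char) :
    specD l 1 (0, true, true, 0) true
      = if (splitCh '.' l).length ≠ 4 then "Neither" else ipv4A (splitCh '.' l) := by
  rcases hsp : splitCh '.' l with _ | ⟨h, t⟩
  · exact absurd hsp (splitCh_ne_nil '.' l)
  rw [ipv4A_eq]
  simp only [specD, hsp, List.headI, List.tail, List.length_cons, List.all_cons,
    Bool.and_eq_true, List.all_eq_true, isV4Part_eq_v4okS]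
  by_cases hlen : t.length + 1 = 4
  · rw [if_neg (show ¬ t.length + 1 ≠ 4 by omega)]
    refine if_congr ?_ rfl rfl
    have hseg : (segInit : Nat × Bool × Bool × Int) = (0, true, true, 0) := rfl
    rw [hseg]
    constructor
    · rintro ⟨_, _, hh, ht⟩; exact ⟨hh, ht⟩
    · rintro ⟨hh, ht⟩; exact ⟨by omega, by trivial, hh, ht⟩
  · rw [if_pos (show t.length + 1 ≠ 4 from hlen),
      if_neg (fun hcond => hlen (by have := hcond.1; omega))]

lemma specC_top (l : List Char) :
    specC l 1 (0, true, true, 0) true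
      = if (splitCh ':' l).length ≠ 8 then "Neither" else ipv6A (splitCh ':' l) := by
  rcases hsp : splitCh ':' l with _ | ⟨h, t⟩
  · exact absurd hsp (splitCh_ne_nil ':' l)
  rw [ipv6A_eq]
  simp only [specC, hsp, List.headI, List.tail, List.length_cons, List.all_cons,
    Bool.and_eq_true, List.all_eq_true, isV6Part_eq_v6okS]
  by_cases hlen : t.length + 1 = 8
  · rw [if_neg (show ¬ t.length + 1 ≠ 8 by omega)]
    refine if_congr ?_ rfl rfl
    have hseg : (segInit : Nat × Bool × Bool × Int) = (0, true, true, 0) := rfl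
    rw [hseg]
    constructor
    · rintro ⟨_, _, hh, ht⟩; exact ⟨hh, ht⟩
    · rintro ⟨hh, ht⟩; exact ⟨by omega, by trivial, hh, ht⟩
  · rw [if_pos (show t.length + 1 ≠ 8 from hlen),
      if_neg (fun hcond => hlen (by have := hcond.1; omega))]

-- the value A appends for one string
def classifyA (ip : String) : String :=
  let notI4 := !(PySem.Str.isIn "." ip)
  let notI6 := !(PySem.Str.isIn ":" ip)
  if (notI4 && notI6 || !(notI4 || notI6)) = true then "Neither"
  else if notI4 = true then
    let temp := PySem.Chars.splitOn ip.toList [':']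
    if temp.length ≠ 8 then "Neither" else ipv6A temp
  else if notI6 = true then
    let temp := PySem.Chars.splitOn ip.toList ['.']
    if temp.length ≠ 4 then "Neither" else ipv4A temp
  else "Neither"

lemma checkIPs_go (l : List String) : ∀ acc : List String,
    l.foldl (fun result ip =>
      let notI4 := !(PySem.Str.isIn "." ip)
      let notI6 := !(PySem.Str.isIn ":" ip)
      if (notI4 && notI6 || !(notI4 || notI6)) = true then result ++ ["Neither"]
      else if notI4 = true then
        let temp := PySem.Chars.splitOn ip.toList [':']
        if temp.length ≠ 8 then result ++ ["Neither"] else result ++ [ipv6A temp]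
      else if notI6 = true then
        let temp := PySem.Chars.splitOn ip.toList ['.']
        if temp.length ≠ 4 then result ++ ["Neither"] else result ++ [ipv4A temp]
      else result) acc = acc ++ l.map classifyA := by
  induction l with
  | nil => intro acc; simp
  | cons ip rest ih =>
    intro acc
    rw [List.foldl_cons, List.map_cons, ih]
    have hbody : ∀ r : List String, (let notI4 := !(PySem.Str.isIn "." ip)
        let notI6 := !(PySem.Str.isIn ":" ip)
        if (notI4 && notI6 || !(notI4 || notI6)) = true then r ++ ["Neither"]
        else if notI4 = true then
          let temp := PySem.Chars.splitOn ip.toList [':']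
          if temp.length ≠ 8 then r ++ ["Neither"] else r ++ [ipv6A temp]
        else if notI6 = true then
          let temp := PySem.Chars.splitOn ip.toList ['.']
          if temp.length ≠ 4 then r ++ ["Neither"] else r ++ [ipv4A temp]
        else r) = r ++ [classifyA ip] := by
      intro r
      simp only [classifyA]
      split_ifs with hA hB hC hD hE <;> first | rfl | (exfalso; revert hA; simp_all)
    rw [hbody]
    simp

lemma classify_eq (ip : String) :
    classifyA ip = scanGo ip.toList none 1 0 true true 0 true true := by
  rw [scanGo_none]
  have hdot : PySem.Str.isIn "." ip = PySem.Chars.isIn ['.'] ip.toList := by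
    simp [PySem.Str.isIn]
  have hcol : PySem.Str.isIn ":" ip = PySem.Chars.isIn [':'] ip.toList := by
    simp [PySem.Str.isIn]
  by_cases hd : '.' ∈ ip.toList <;> by_cases hc : ':' ∈ ip.toList
  · have h1 : PySem.Chars.isIn ['.'] ip.toList = true := (isIn_single_iff_mem _ _).2 hd
    have h2 : PySem.Chars.isIn [':'] ip.toList = true := (isIn_single_iff_mem _ _).2 hc
    rw [if_pos ⟨hd, hc⟩]
    simp [classifyA, h1, h2]
  · have h1 : PySem.Chars.isIn ['.'] ip.toList = true := (isIn_single_iff_mem _ _).2 hd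
    have h2 : PySem.Chars.isIn [':'] ip.toList = false := by
      rw [← Bool.not_eq_true, isIn_single_iff_mem]; exact hc
    rw [if_neg (fun h => hc h.2), if_pos hd, specD_top]
    simp [classifyA, h1, h2, splitOn_single]
  · have h1 : PySem.Chars.isIn ['.'] ip.toList = false := by
      rw [← Bool.not_eq_true, isIn_single_iff_mem]; exact hd
    have h2 : PySem.Chars.isIn [':'] ip.toList = true := (isIn_single_iff_mem _ _).2 hc
    rw [if_neg (fun h => hd h.1), if_neg hd, if_pos hc, specC_top]
    simp [classifyA, h1, h2, splitOn_single]
  · have h1 : PySem.Chars.isIn ['.'] ip.toList = false := by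
      rw [← Bool.not_eq_true, isIn_single_iff_mem]; exact hd
    have h2 : PySem.Chars.isIn [':'] ip.toList = false := by
      rw [← Bool.not_eq_true, isIn_single_iff_mem]; exact hc
    rw [if_neg (fun h => hd h.1), if_neg hd, if_neg hc]
    simp [classifyA, h1, h2]

-- ===== VERDICT (by name: the statement is the Claim_ definition above) =====
theorem checkIPs_spec : Claim_equal_checkIPs := by
  intro ip_array _
  unfold Spec_checkIPs checkIPs checkIPs_alt
  rw [checkIPs_go ip_array []]
  simp [List.map_congr_left fun ip _ => classify_eq ip]
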